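-- pv_equiv track=rewrite | github.com/Okashanadeem/LearnByFun | Caesar Cipher/caesarCipherDecode.py | mirror_letters
-- ===== SOURCE A (Python) =====
-- def mirror_letters(text):
--     result = []
--     for ch in text:
--         if ch.isalpha():
--             if ch.islower():
--                 result.append(chr(ord('z') - (ord(ch) - ord('a'))))
--             else:
--                 result.append(chr(ord('Z') - (ord(ch) - ord('A'))))
--         else:
--             result.append(ch)
--     return ''.join(result)
-- ===== SOURCE B (Python) =====
-- _LOWER = 'abcdefghijklmnopqrstuvwxyz'
-- _UPPER = _LOWER.upper()
-- _TABLE = str.maketrans(_LOWER + _UPPER, _LOWER[::-1] + _UPPER[::-1])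
--
--
-- def mirror_letters(text):
--     return text.translate(_TABLE)
-- ===== Notes on version B (the rewrite author's own statement) =====
-- stated objective: idiomatic
-- what changed: Replaced A's per-character isalpha/islower branching with ord arithmetic by a 52-entry translation table built once with str.maketrans and a single text.translate call.
import Mathlib
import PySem

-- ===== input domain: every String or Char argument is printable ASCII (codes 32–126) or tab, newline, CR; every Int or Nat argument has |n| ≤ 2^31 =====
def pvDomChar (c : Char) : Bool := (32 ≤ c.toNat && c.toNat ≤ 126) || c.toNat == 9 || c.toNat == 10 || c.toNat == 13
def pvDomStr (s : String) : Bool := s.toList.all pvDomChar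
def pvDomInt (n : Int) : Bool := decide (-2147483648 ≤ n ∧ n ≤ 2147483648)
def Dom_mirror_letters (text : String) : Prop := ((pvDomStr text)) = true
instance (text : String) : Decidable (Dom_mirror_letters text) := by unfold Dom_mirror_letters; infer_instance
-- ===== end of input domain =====

-- B builds a 52-entry mirror table once and translates through it in one table-driven pass,
-- replacing A's per-character isalpha/islower branching and ord arithmetic (idiomatic).


-- ===== PORT A =====
-- the loop body of A: per-character branch with ord arithmetic
def pvStepA (ch : Char) : Char :=
  if PySem.Chars.isalpha ch then
    if PySem.Chars.islower ch then
      Char.ofNat ('z'.toNat - (ch.toNat - 'a'.toNat))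
    else
      Char.ofNat ('Z'.toNat - (ch.toNat - 'A'.toNat))
  else ch

def mirror_letters (text : String) : String :=
  String.ofList (text.toList.foldl (fun result ch => result ++ [pvStepA ch]) [])

-- ===== PORT B =====
-- str.maketrans(_LOWER + _UPPER, _LOWER[::-1] + _UPPER[::-1]) as an association table
def pvLower : List Char := "abcdefghijklmnopqrstuvwxyz".toList
def pvUpper : List Char := pvLower.map PySem.Chars.upperChar
def pvTable : PySem.Dict Char Char :=
  PySem.Dict.ofList ((pvLower ++ pvUpper).zip (pvLower.reverse ++ pvUpper.reverse))

-- text.translate(_TABLE): one table-driven pass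
def mirror_letters_alt (text : String) : String :=
  String.ofList (text.toList.map (fun c => (pvTable.get? c).getD c))

-- ===== PRECONDITION & SPEC =====
def Spec_mirror_letters (text : String) (out : String) : Prop := out = mirror_letters_alt text
instance (text : String) (out : String) : Decidable (Spec_mirror_letters text out) := by unfold Spec_mirror_letters; infer_instance

-- ===== CLAIM (what is proved, stated in full; the proofs are below) =====
def Claim_equal_mirror_letters : Prop := ∀ (text : String), Dom_mirror_letters text → Spec_mirror_letters text (mirror_letters text)

-- ===== LEMMAS AND PROOFS =====
lemma pvFoldA (l : List Char) (acc : List Char) :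
    l.foldl (fun result ch => result ++ [pvStepA ch]) acc = acc ++ l.map pvStepA := by
  induction l generalizing acc with
  | nil => simp
  | cons c t ih => simp [List.foldl, ih]

set_option maxRecDepth 8192 in
lemma pvRange128 :
    ∀ n ∈ List.range 128, pvStepA (Char.ofNat n) = (pvTable.get? (Char.ofNat n)).getD (Char.ofNat n) := by
  decide

lemma pvPerChar (c : Char) (h : pvDomChar c = true) :
    pvStepA c = (pvTable.get? c).getD c := by
  have hlt : c.toNat < 128 := by
    simp only [pvDomChar, Bool.or_eq_true, Bool.and_eq_true, decide_eq_true_eq, beq_iff_eq] at h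
    omega
  have hv : Char.ofNat c.toNat = c := Char.ofNat_toNat c
  have := pvRange128 c.toNat (List.mem_range.mpr hlt)
  rwa [hv] at this

-- ===== VERDICT (by name: the statement is the Claim_ definition above) =====
set_option maxRecDepth 8192 in
theorem mirror_letters_spec : Claim_equal_mirror_letters := by
  intro text hdom
  unfold Spec_mirror_letters mirror_letters mirror_letters_alt
  rw [pvFoldA]
  simp only [List.nil_append]
  congr 1
  apply List.map_congr_left
  intro c hc
  exact pvPerChar c (by
    have := hdom
    unfold Dom_mirror_letters pvDomStr at this
    exact List.all_eq_true.mp this c hc)
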